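-- pv_equiv track=rewrite | github.com/shyampathak22/mdlARC_scale | src/data.py | tokens_to_grid
-- ===== SOURCE A (Python) =====
-- START_TOKEN_ID = 10
--
-- NEWLINE_TOKEN_ID = 11
--
-- IO_SEP_TOKEN_ID = 12
--
-- END_TOKEN_ID = 13
--
-- def tokens_to_grid(tokens: list[int]) -> list[list[int]]:
--     """
--     Convert a token sequence back to a 2D grid.
--     Splits on NEWLINE tokens.
--     """
--     grid = []
--     current_row = []
--     for tok in tokens:
--         if tok == NEWLINE_TOKEN_ID:
--             if current_row:  # Don't add empty rows
--                 grid.append(current_row)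
--                 current_row = []
--         elif tok in (START_TOKEN_ID, IO_SEP_TOKEN_ID, END_TOKEN_ID):
--             continue  # Skip special tokens
--         else:
--             current_row.append(tok)
--     if current_row:
--         grid.append(current_row)
--     return grid
-- ===== SOURCE B (Python) =====
-- START_TOKEN_ID = 10
-- NEWLINE_TOKEN_ID = 11
-- IO_SEP_TOKEN_ID = 12
-- END_TOKEN_ID = 13
-- SPECIAL_TOKEN_IDS = (START_TOKEN_ID, IO_SEP_TOKEN_ID, END_TOKEN_ID)
--
-- def tokens_to_grid(tokens: list[int]) -> list[list[int]]:
--     """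
--     Convert a token sequence back to a 2D grid.
--
--     Splits the sequence into newline-delimited segments, removes the
--     special tokens from each segment, and keeps the non-empty rows.
--     """
--     grid = []
--     rest = tokens
--     while rest:
--         j = 0
--         while j < len(rest) and rest[j] != NEWLINE_TOKEN_ID:
--             j += 1
--         row = [t for t in rest[:j] if t not in SPECIAL_TOKEN_IDS]
--         if row:
--             grid.append(row)
--         rest = rest[j + 1:]
--     return grid
-- ===== Notes on version B (the rewrite author's own statement) =====
-- stated objective: alternative
-- what changed: Replaces A's one-pass state machine (grid + current_row with conditional flushes) by a split-then-filter shape: cut the list into newline-delimited segments, filter specials from each segment with a comprehension, keep the non-empty rows.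
import Mathlib
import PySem

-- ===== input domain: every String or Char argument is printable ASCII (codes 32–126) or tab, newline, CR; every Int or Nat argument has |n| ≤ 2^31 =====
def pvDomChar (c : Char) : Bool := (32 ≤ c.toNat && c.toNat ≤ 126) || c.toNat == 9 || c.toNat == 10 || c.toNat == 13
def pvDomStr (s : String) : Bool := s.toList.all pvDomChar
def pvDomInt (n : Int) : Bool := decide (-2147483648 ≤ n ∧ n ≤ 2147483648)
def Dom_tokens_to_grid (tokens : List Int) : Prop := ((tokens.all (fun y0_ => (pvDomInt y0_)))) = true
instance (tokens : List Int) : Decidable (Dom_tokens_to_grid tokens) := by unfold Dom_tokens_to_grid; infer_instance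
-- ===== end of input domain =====

-- B splits the tokens into newline-delimited segments and filters each segment,
-- instead of A's one-pass grid/current_row state machine; objective: alternative (same cost).

-- ===== PORT A =====
-- the for-loop of A: state (grid, current_row), tokens processed left to right
def tokensToGridLoopA : List (List Int) → List Int → List Int → List (List Int) × List Int
  | grid, cur, [] => (grid, cur)
  | grid, cur, t :: rest =>
    if t = 11 then
      if cur ≠ [] then tokensToGridLoopA (grid ++ [cur]) [] rest
      else tokensToGridLoopA grid cur rest
    else if t = 10 ∨ t = 12 ∨ t = 13 then
      tokensToGridLoopA grid cur rest
    else
      tokensToGridLoopA grid (cur ++ [t]) rest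

def tokens_to_grid (tokens : List Int) : List (List Int) :=
  let s := tokensToGridLoopA [] [] tokens
  if s.2 ≠ [] then s.1 ++ [s.2] else s.1

-- ===== PORT B =====
-- Source B's outer while loop over the remaining suffix `rest`; the inner index scan up
-- to the first newline is `takeWhile`, `rest[j+1:]` is `dropWhile … |>.drop 1`
def tokens_to_grid_alt : List Int → List (List Int)
  | [] => []
  | t :: rest =>
    let seg := (t :: rest).takeWhile (fun x => x != 11)
    let row := seg.filter (fun x => !(x == 10 || x == 12 || x == 13))
    let rest' := ((t :: rest).dropWhile (fun x => x != 11)).drop 1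
    if row ≠ [] then row :: tokens_to_grid_alt rest' else tokens_to_grid_alt rest'
termination_by toks => toks.length
decreasing_by
  all_goals
    simp only [List.length_drop]
    have := List.length_dropWhile_le (p := fun x => x != 11) (l := t :: rest)
    simp at this ⊢; omega

-- ===== PRECONDITION & SPEC =====
def Spec_tokens_to_grid (tokens : List Int) (out : List (List Int)) : Prop := out = tokens_to_grid_alt tokens
instance (tokens : List Int) (out : List (List Int)) : Decidable (Spec_tokens_to_grid tokens out) := by unfold Spec_tokens_to_grid; infer_instance

-- ===== CLAIM (what is proved, stated in full; the proofs are below) =====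
def Claim_equal_tokens_to_grid : Prop := ∀ (tokens : List Int), Dom_tokens_to_grid tokens → Spec_tokens_to_grid tokens (tokens_to_grid tokens)

-- ===== LEMMAS AND PROOFS =====

-- proof-only: the newline-split of the token list (specials dropped), empty segments kept
def pvSplitRows : List Int → List (List Int)
  | [] => [[]]
  | t :: rest =>
    let parts := pvSplitRows rest
    if t = 11 then [] :: parts
    else if t = 10 ∨ t = 12 ∨ t = 13 then parts
    else match parts with
      | p :: ps => (t :: p) :: ps
      | [] => [[t]]

lemma pvSplitRows_ne_nil (toks : List Int) : pvSplitRows toks ≠ [] := by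
  induction toks with
  | nil => simp [pvSplitRows]
  | cons t rest ih =>
    simp only [pvSplitRows]
    split_ifs
    · simp
    · exact ih
    · cases pvSplitRows rest <;> simp

-- proof-only: prepend cur to the first segment
def pvConsHead (cur : List Int) : List (List Int) → List (List Int)
  | p :: ps => (cur ++ p) :: ps
  | [] => [cur]

-- proof-only: A's final step (append current_row if non-empty)
def pvFinish (s : List (List Int) × List Int) : List (List Int) :=
  if s.2 ≠ [] then s.1 ++ [s.2] else s.1

-- head/tail of pvSplitRows in terms of the takeWhile/dropWhile decomposition
lemma pvSplitRows_decomp (toks : List Int) :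
    pvSplitRows toks
      = ((toks.takeWhile (fun x => x != 11)).filter
            (fun x => !(x == 10 || x == 12 || x == 13)))
        :: (match toks.dropWhile (fun x => x != 11) with
            | [] => ([] : List (List Int))
            | _ :: r => pvSplitRows r) := by
  induction toks with
  | nil => simp [pvSplitRows]
  | cons t rest ih =>
    by_cases h1 : t = 11
    · simp [pvSplitRows, h1, List.takeWhile, List.dropWhile]
    · have hb : (t != 11) = true := by simp [h1]
      by_cases h2 : t = 10 ∨ t = 12 ∨ t = 13
      · simp only [pvSplitRows, if_neg h1, if_pos h2]
        rw [ih]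
        simp only [List.takeWhile, List.dropWhile, hb, List.filter]
        rcases h2 with h | h | h <;> simp [h]
      · simp only [pvSplitRows, if_neg h1, if_neg h2]
        rw [ih]
        simp only [List.takeWhile, List.dropWhile, hb, List.filter]
        push_neg at h2
        have hsc : (!(t == 10 || t == 12 || t == 13)) = true := by
          simp [h2.1, h2.2.1, h2.2.2]
        rw [hsc]

-- B computes the non-empty rows of the split
lemma alt_eq_split_aux (n : Nat) : ∀ (toks : List Int), toks.length ≤ n →
    tokens_to_grid_alt toks = (pvSplitRows toks).filter (fun row => !row.isEmpty) := by
  induction n with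
  | zero =>
    intro toks h
    have : toks = [] := by cases toks <;> simp_all
    subst this
    simp [tokens_to_grid_alt, pvSplitRows, List.filter]
  | succ n ih =>
    intro toks h
    cases toks with
    | nil => simp [tokens_to_grid_alt, pvSplitRows, List.filter]
    | cons t rest =>
      rw [tokens_to_grid_alt, pvSplitRows_decomp (t :: rest)]
      have hrest : (((t :: rest).dropWhile (fun x => x != 11)).drop 1).length ≤ n := by
        have := List.length_dropWhile_le (p := fun x => x != 11) (l := t :: rest)
        simp only [List.length_drop]
        simp at this h
        omega
      have htail : tokens_to_grid_alt (((t :: rest).dropWhile (fun x => x != 11)).drop 1)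
          = (match (t :: rest).dropWhile (fun x => x != 11) with
              | [] => ([] : List (List Int))
              | _ :: r => pvSplitRows r).filter (fun row => !row.isEmpty) := by
        cases hd : (t :: rest).dropWhile (fun x => x != 11) with
        | nil => simp [tokens_to_grid_alt, List.filter]
        | cons d r =>
          simp only [List.drop_succ_cons, List.drop_zero]
          have hr : r.length ≤ n := by
            rw [hd] at hrest; simpa using hrest
          exact ih r hr
      set row := ((t :: rest).takeWhile (fun x => x != 11)).filter
          (fun x => !(x == 10 || x == 12 || x == 13)) with hrow
      by_cases hne : row ≠ []
      · rw [if_pos hne, htail]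
        have hsc : (!row.isEmpty) = true := by
          cases hr : row with
          | nil => exact absurd hr hne
          | cons a b => simp
        rw [List.filter, hsc]
      · rw [if_neg hne]
        simp only [ne_eq, not_not] at hne
        rw [List.filter, htail, hne]
        simp

lemma alt_eq_split (toks : List Int) :
    tokens_to_grid_alt toks = (pvSplitRows toks).filter (fun row => !row.isEmpty) :=
  alt_eq_split_aux toks.length toks le_rfl

-- A's loop vs the split, generalized over the carried state
lemma loopA_split (toks : List Int) : ∀ (grid : List (List Int)) (cur : List Int),
    pvFinish (tokensToGridLoopA grid cur toks)
    = grid ++ (pvConsHead cur (pvSplitRows toks)).filter (fun row => !row.isEmpty) := by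
  induction toks with
  | nil =>
    intro grid cur
    simp only [tokensToGridLoopA, pvSplitRows, pvConsHead, pvFinish]
    cases cur <;> simp [List.filter]
  | cons t rest ih =>
    intro grid cur
    obtain ⟨p, ps, hps⟩ : ∃ p ps, pvSplitRows rest = p :: ps := by
      cases h : pvSplitRows rest with
      | nil => exact absurd h (pvSplitRows_ne_nil rest)
      | cons p ps => exact ⟨p, ps, rfl⟩
    simp only [tokensToGridLoopA, pvSplitRows]
    split_ifs with h1 h2
    · rw [ih (grid ++ [cur]) []]
      simp [hps, pvConsHead, List.filter, h2]
    · rw [ih grid cur]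
      simp only [ne_eq, not_not] at h2
      simp [hps, h2, pvConsHead, List.filter]
    · rw [ih grid cur]
    · rw [ih grid (cur ++ [t])]
      simp [hps, pvConsHead]

-- ===== VERDICT (by name: the statement is the Claim_ definition above) =====
theorem tokens_to_grid_spec : Claim_equal_tokens_to_grid := by
  intro tokens _
  show tokens_to_grid tokens = tokens_to_grid_alt tokens
  have hA : tokens_to_grid tokens = pvFinish (tokensToGridLoopA [] [] tokens) := rfl
  rw [hA, alt_eq_split, loopA_split tokens [] []]
  obtain ⟨p, ps, hps⟩ : ∃ p ps, pvSplitRows tokens = p :: ps := by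
    cases h : pvSplitRows tokens with
    | nil => exact absurd h (pvSplitRows_ne_nil tokens)
    | cons p ps => exact ⟨p, ps, rfl⟩
  simp [hps, pvConsHead]
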